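-- pv_equiv track=rewrite | github.com/CarolHall-NCSU-CBE/PepBD_V2 | PepBD_Analysis/HydrationProperties.py | calc_patch_size
-- ===== SOURCE A (Python) =====
-- def calc_patch_size(pep):
--     max_lengths = [0,0]
--     cur_type = pep[0]
--     length=1
--     for AA in pep[1:]:
--         if AA == cur_type:
--             length += 1
--         else:
--             max_lengths[cur_type] = max( max_lengths[cur_type], length)
--             cur_type = AA
--             length = 1
--     max_lengths[cur_type] = max( max_lengths[cur_type], length)
--     return max_lengths
-- ===== SOURCE B (Python) =====
-- def calc_patch_size(pep):
--     # phase 1: run-length encode the sequence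
--     runs = []
--     for x in pep:
--         if runs and runs[-1][0] == x:
--             runs[-1][1] += 1
--         else:
--             runs.append([x, 1])
--     # phase 2: take the per-type maximum over the runs
--     max_lengths = [0, 0]
--     for t, n in runs:
--         if n > max_lengths[t]:
--             max_lengths[t] = n
--     return max_lengths
-- ===== Notes on version B (the rewrite author's own statement) =====
-- stated objective: alternative
-- what changed: Replaces A's single-pass cur_type/length state machine with flush-on-change by a two-phase pipeline: first run-length encode the sequence into a list of (type, length) runs, then aggregate the per-type maximum over that list.
import Mathlib
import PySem

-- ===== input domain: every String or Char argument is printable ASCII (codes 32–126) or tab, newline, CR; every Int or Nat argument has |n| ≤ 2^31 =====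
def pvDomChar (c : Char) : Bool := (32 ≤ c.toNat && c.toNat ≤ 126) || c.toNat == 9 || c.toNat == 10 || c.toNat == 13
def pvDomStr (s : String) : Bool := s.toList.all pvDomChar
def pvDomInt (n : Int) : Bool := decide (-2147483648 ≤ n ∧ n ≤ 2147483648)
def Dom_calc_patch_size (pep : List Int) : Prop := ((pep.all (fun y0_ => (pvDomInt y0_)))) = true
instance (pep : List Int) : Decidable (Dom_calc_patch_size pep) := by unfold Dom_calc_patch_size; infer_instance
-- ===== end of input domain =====

-- B replaces A's single-pass cur_type/length state machine (flush on change + final flush) by a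
-- two-phase pipeline: run-length encode the list, then aggregate the per-type maximum (objective: alternative).
-- ===== PORT A =====
-- Python xs[i] read (negative index from the end); on admitted inputs the index is in range
-- (out of range Python raises IndexError, which Pre_ excludes).
def pyGetIntAt (xs : List Int) (i : Int) : Int :=
  (PySem.List.pyGet? xs i).getD 0

-- Python 'xs[i] = v' (negative index from the end), exact where Python returns;
-- out of range Python raises IndexError (excluded by Pre_).
def pySetIntAt (xs : List Int) (i : Int) (v : Int) : List Int :=
  let j := if i < 0 then i + xs.length else i
  if 0 ≤ j ∧ j < xs.length then xs.set j.toNat v else xs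

-- max_lengths[cur_type] = max(max_lengths[cur_type], length)
def calcAFlush (ml : List Int) (cur len : Int) : List Int :=
  pySetIntAt ml cur (max (pyGetIntAt ml cur) len)

def calcALoop : List Int → List Int → Int → Int → List Int
  | [], ml, cur, len => calcAFlush ml cur len
  | AA :: rest, ml, cur, len =>
      if AA = cur then calcALoop rest ml cur (len + 1)
      else calcALoop rest (calcAFlush ml cur len) AA 1

def calc_patch_size (pep : List Int) : List Int :=
  match pep with
  | [] => []          -- Python raises IndexError at pep[0]; excluded by Pre_
  | p :: rest => calcALoop rest [0, 0] p 1

-- ===== PORT B =====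
-- phase-1 step: 'if runs and runs[-1][0] == x: runs[-1][1] += 1 else: runs.append([x, 1])'
def rleStep (runs : List (Int × Int)) (x : Int) : List (Int × Int) :=
  match runs.getLast? with
  | some tn => if tn.1 = x then runs.dropLast ++ [(tn.1, tn.2 + 1)] else runs ++ [(x, 1)]
  | none => [(x, 1)]

-- phase-2 step: 'if n > max_lengths[t]: max_lengths[t] = n'
def aggStep (best : List Int) (tn : Int × Int) : List Int :=
  if pyGetIntAt best tn.1 < tn.2 then pySetIntAt best tn.1 tn.2 else best

def calc_patch_size_alt (pep : List Int) : List Int :=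
  (pep.foldl rleStep []).foldl aggStep [0, 0]

-- ===== PRECONDITION & SPEC =====
-- Pre_ excludes exactly the inputs on which the Python A raises IndexError: the empty list
-- (pep[0]) and lists with an element below -2 or above 1 (indexing the 2-slot max_lengths).
def Pre_calc_patch_size (pep : List Int) : Prop :=
  pep ≠ [] ∧ ∀ x ∈ pep, -2 ≤ x ∧ x ≤ 1
instance (pep : List Int) : Decidable (Pre_calc_patch_size pep) := by
  unfold Pre_calc_patch_size; infer_instance
def pvWitness_calc_patch_size : List Int := [0, 1, 1, -1, 0, 0]

def Spec_calc_patch_size (pep : List Int) (out : List Int) : Prop := out = calc_patch_size_alt pep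
instance (pep : List Int) (out : List Int) : Decidable (Spec_calc_patch_size pep out) := by unfold Spec_calc_patch_size; infer_instance

-- ===== CLAIM (what is proved, stated in full; the proofs are below) =====
def Claim_equal_calc_patch_size : Prop := ∀ (pep : List Int), Dom_calc_patch_size pep → Pre_calc_patch_size pep → Spec_calc_patch_size pep (calc_patch_size pep)

-- ===== LEMMAS AND PROOFS =====

-- the run-length encoding of 'a pending run (cur, len) followed by rest'
def rleCont (cur len : Int) : List Int → List (Int × Int)
  | [] => [(cur, len)]
  | x :: xs => if x = cur then rleCont cur (len + 1) xs else (cur, len) :: rleCont x 1 xs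

-- A's loop flushes exactly one slot per run: it is the fold of its flush over the runs.
lemma calcALoop_eq_foldl_flush (rest : List Int) :
    ∀ (ml : List Int) (cur len : Int),
      calcALoop rest ml cur len =
        (rleCont cur len rest).foldl (fun b r => calcAFlush b r.1 r.2) ml := by
  induction rest with
  | nil => intro ml cur len; simp [calcALoop, rleCont]
  | cons x xs ih =>
      intro ml cur len
      by_cases h : x = cur <;> simp [calcALoop, rleCont, h, ih]

-- B's phase 1 run-length encodes: folding rleStep from a state ending in run (cur, len)
-- appends exactly the continued encoding.
lemma foldl_rleStep_append (xs : List Int) :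
    ∀ (runs : List (Int × Int)) (cur len : Int),
      xs.foldl rleStep (runs ++ [(cur, len)]) = runs ++ rleCont cur len xs := by
  induction xs with
  | nil => intro runs cur len; simp [rleCont]
  | cons x xs ih =>
      intro runs cur len
      by_cases h : x = cur
      · subst h
        have : rleStep (runs ++ [(x, len)]) x = runs ++ [(x, len + 1)] := by
          simp [rleStep]
        simp [this, ih, rleCont]
      · have hcx : ¬ cur = x := fun hc => h hc.symm
        have : rleStep (runs ++ [(cur, len)]) x = (runs ++ [(cur, len)]) ++ [(x, 1)] := by
          simp [rleStep, hcx]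
        rw [List.foldl_cons, this, ih]
        simp [rleCont, h]

-- every type occurring in rleCont is the pending type or an element of the tail
lemma rleCont_types (xs : List Int) :
    ∀ (cur len : Int) (r : Int × Int), r ∈ rleCont cur len xs → r.1 = cur ∨ r.1 ∈ xs := by
  induction xs with
  | nil => intro cur len r hr; simp [rleCont] at hr; simp [hr]
  | cons x xs ih =>
      intro cur len r hr
      by_cases h : x = cur
      · simp [rleCont, h] at hr
        rcases ih cur (len + 1) r hr with h' | h' <;> simp [h', h]
      · simp [rleCont, h] at hr
        rcases hr with h' | h'
        · simp [h']
        · rcases ih x 1 r h' with h' | h' <;> simp [h']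

-- on a 2-slot table and an in-range (possibly negative, Python-wrapped) type,
-- B's conditional write equals A's max-flush
lemma aggStep_eq_flush (b0 b1 t n : Int) (ht : -2 ≤ t ∧ t ≤ 1) :
    aggStep [b0, b1] (t, n) = calcAFlush [b0, b1] t n := by
  obtain ⟨h1, h2⟩ := ht
  interval_cases t <;>
    simp [aggStep, calcAFlush, pyGetIntAt, pySetIntAt, PySem.List.pyGet?, PySem.List.pyIdx?] <;>
    split_ifs <;> simp <;> omega

-- folding the two steps over a run list of in-range types agrees (table stays 2-slot)
lemma foldl_agg_eq_foldl_flush (runs : List (Int × Int)) :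
    ∀ (b0 b1 : Int), (∀ r ∈ runs, -2 ≤ r.1 ∧ r.1 ≤ 1) →
      runs.foldl aggStep [b0, b1] = runs.foldl (fun b r => calcAFlush b r.1 r.2) [b0, b1] := by
  induction runs with
  | nil => intro b0 b1 _; rfl
  | cons r rs ih =>
      intro b0 b1 hall
      obtain ⟨t, n⟩ := r
      have hr := hall (t, n) (by simp)
      have hflush : calcAFlush [b0, b1] t n =
          [if t = 0 ∨ t = -2 then max b0 n else b0,
           if t = 1 ∨ t = -1 then max b1 n else b1] := by
        obtain ⟨h1, h2⟩ := hr
        interval_cases t <;>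
          simp [calcAFlush, pyGetIntAt, pySetIntAt, PySem.List.pyGet?, PySem.List.pyIdx?]
      rw [List.foldl_cons, List.foldl_cons, aggStep_eq_flush b0 b1 t n hr, hflush]
      split_ifs <;> exact ih _ _ (fun r' hr' => hall r' (by simp [hr']))

-- ===== VERDICT (by name: the statement is the Claim_ definition above) =====
theorem calc_patch_size_spec : Claim_equal_calc_patch_size := by
  intro pep _ hpre
  obtain ⟨hne, hall⟩ := hpre
  unfold Spec_calc_patch_size
  match pep, hne with
  | p :: rest, _ =>
    show calcALoop rest [0, 0] p 1 = calc_patch_size_alt (p :: rest)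
    have hrle : (p :: rest).foldl rleStep [] = rleCont p 1 rest := by
      have h0 : rleStep [] p = [(p, 1)] := by simp [rleStep]
      rw [List.foldl_cons, h0]
      simpa using foldl_rleStep_append rest [] p 1
    have htypes : ∀ r ∈ rleCont p 1 rest, -2 ≤ r.1 ∧ r.1 ≤ 1 := by
      intro r hr
      rcases rleCont_types rest p 1 r hr with h | h
      · exact h ▸ hall p (by simp)
      · exact hall r.1 (by simp [h])
    unfold calc_patch_size_alt
    rw [hrle, calcALoop_eq_foldl_flush, foldl_agg_eq_foldl_flush _ 0 0 htypes]
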